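-- pv_equiv track=rewrite | github.com/Patxi91/CodeWars_Cloud | 7kyu-Battle of the characters (Easy)-Patxi.py | findTheSum
-- ===== SOURCE A (Python) =====
-- def findTheSum(str):
--
--     alpha = ""
--
--     # Traverse the given string
--     for i in range(0, len(str)):
--
--         # If character is an alphabet
--         if ((str[i] >= 'A' and str[i] <= 'Z') or (str[i] >= 'a' and str[i] <= 'z')):
--             alpha += str[i]
--
--     # Stores the sum of order of values
--     score = 0
--     n = 0
--
--     for i in range(0, len(alpha)):
--
--         # Find the score
--         if (alpha[i] >= 'A' and alpha[i] <= 'Z'):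
--             score += ord(alpha[i]) - ord('A') + 1
--
--         else:
--             score += ord(alpha[i]) - ord('a') + 1
--
--     return score
-- ===== SOURCE B (Python) =====
-- def findTheSum(str):
--     # one pass: count each lowercased ASCII letter in a dict
--     counts = {}
--     for ch in str:
--         if ('A' <= ch <= 'Z') or ('a' <= ch <= 'z'):
--             low = ch.lower()
--             counts[low] = counts.get(low, 0) + 1
--     # second pass over the distinct letters, weighted by their counts
--     total = 0
--     for letter, cnt in counts.items():
--         total += (ord(letter) - ord('a') + 1) * cnt
--     return total
-- ===== Notes on version B (the rewrite author's own statement) =====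
-- stated objective: alternative
-- what changed: B replaces A's two list passes (build the letters string, then score each occurrence) with a count table: one pass fills a dict of lowercased-letter counts, a second pass over the distinct letters sums (position * count).
import Mathlib
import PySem

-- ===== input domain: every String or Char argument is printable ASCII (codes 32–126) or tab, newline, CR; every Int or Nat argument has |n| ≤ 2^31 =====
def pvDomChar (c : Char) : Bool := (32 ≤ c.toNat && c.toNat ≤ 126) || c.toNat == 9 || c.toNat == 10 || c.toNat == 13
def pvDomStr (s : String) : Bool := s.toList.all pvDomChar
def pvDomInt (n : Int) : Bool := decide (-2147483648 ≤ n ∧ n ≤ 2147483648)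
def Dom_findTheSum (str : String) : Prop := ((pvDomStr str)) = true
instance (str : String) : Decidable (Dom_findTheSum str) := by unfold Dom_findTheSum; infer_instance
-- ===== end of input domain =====

-- B changes the decomposition: a dict of lowercased-letter counts built in one pass, then a
-- weighted sum over the distinct letters; not faster, an alternative structure.

-- ===== PORT A =====
-- A: first loop collects the ASCII letters into `alpha`, second loop scores each occurrence.
def findTheSum (str : String) : Int :=
  let alpha : List Char := str.toList.foldl
    (fun acc c =>
      if ('A' ≤ c ∧ c ≤ 'Z') ∨ ('a' ≤ c ∧ c ≤ 'z') then acc ++ [c] else acc) []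
  alpha.foldl
    (fun score c =>
      if 'A' ≤ c ∧ c ≤ 'Z' then score + ((c.toNat : Int) - ('A'.toNat : Int) + 1)
      else score + ((c.toNat : Int) - ('a'.toNat : Int) + 1)) 0

-- ===== PORT B =====
-- ch.lower() for a single char; exact on the ASCII letters B feeds it
def lowAscii (c : Char) : Char :=
  if 'A' ≤ c ∧ c ≤ 'Z' then Char.ofNat (c.toNat + 32) else c

def findTheSum_alt (str : String) : Int :=
  let counts : PySem.Dict Char Int := str.toList.foldl
    (fun d c =>
      if ('A' ≤ c ∧ c ≤ 'Z') ∨ ('a' ≤ c ∧ c ≤ 'z') then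
        let low := lowAscii c
        d.insert low (d.getD low 0 + 1)
      else d) PySem.Dict.empty
  counts.items.foldl
    (fun total kv => total + ((kv.1.toNat : Int) - ('a'.toNat : Int) + 1) * kv.2) 0

-- ===== PRECONDITION & SPEC =====
def Spec_findTheSum (str : String) (out : Int) : Prop := out = findTheSum_alt str
instance (str : String) (out : Int) : Decidable (Spec_findTheSum str out) := by unfold Spec_findTheSum; infer_instance

-- ===== CLAIM (what is proved, stated in full; the proofs are below) =====
def Claim_equal_findTheSum : Prop := ∀ (str : String), Dom_findTheSum str → Spec_findTheSum str (findTheSum str)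

-- ===== LEMMAS AND PROOFS =====

-- B's first loop builds exactly Counter of the lowercased letters list
theorem foldl_filter_insert (l : List Char) (d : PySem.Dict Char Int) :
    l.foldl (fun d c =>
      if ('A' ≤ c ∧ c ≤ 'Z') ∨ ('a' ≤ c ∧ c ≤ 'z') then
        let low := lowAscii c
        d.insert low (d.getD low 0 + 1)
      else d) d
    = ((l.filter (fun c => decide (('A' ≤ c ∧ c ≤ 'Z') ∨ ('a' ≤ c ∧ c ≤ 'z')))).map lowAscii).foldl
        (fun d x => d.insert x (d.getD x 0 + 1)) d := by
  induction l generalizing d with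
  | nil => rfl
  | cons c t ih =>
      by_cases h : ('A' ≤ c ∧ c ≤ 'Z') ∨ ('a' ≤ c ∧ c ≤ 'z') <;>
        simp [List.foldl_cons, h, ih]

-- summing an ite that fires at exactly one element of a nodup list
theorem sum_map_ite_single (f : Char → Int) (y : Char) (ks : List Char)
    (hnd : ks.Nodup) (hy : y ∈ ks) :
    (ks.map (fun k => if k = y then f k else 0)).sum = f y := by
  induction ks with
  | nil => cases hy
  | cons a t ih =>
      rcases List.nodup_cons.mp hnd with ⟨ha, ht⟩
      rcases List.mem_cons.mp hy with h1 | hyt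
      · subst h1
        have hz : (t.map (fun k => if k = y then f k else 0)) = t.map (fun _ => 0) := by
          apply List.map_congr_left
          intro x hx
          have hxy : x ≠ y := fun hh => ha (hh ▸ hx)
          simp [hxy]
        simp [hz]
      · have hay : a ≠ y := fun h => ha (h ▸ hyt)
        simp [hay, ih ht hyt]

-- the count-weighted sum over the distinct letters equals the plain sum over all occurrences
theorem sum_counts (f : Char → Int) (ks : List Char) (hnd : ks.Nodup) :
    ∀ ys : List Char, (∀ y ∈ ys, y ∈ ks) →
      (ks.map (fun k => f k * (ys.count k : Int))).sum = (ys.map f).sum := by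
  intro ys
  induction ys with
  | nil => intro _; simp
  | cons y t ih =>
      intro hsub
      have hmem : y ∈ ks := hsub y (List.mem_cons_self ..)
      have hsub' : ∀ z ∈ t, z ∈ ks := fun z hz => hsub z (List.mem_cons_of_mem _ hz)
      have hsplit : (ks.map (fun k => f k * ((y :: t).count k : Int)))
          = ks.map (fun k => f k * (t.count k : Int) + (if k = y then f k else 0)) := by
        apply List.map_congr_left
        intro k _
        by_cases hk : k = y
        · subst hk; simp; ring
        · have hc : ((y :: t).count k : Int) = ((t.count k : Nat) : Int) := by
            simp [List.count_cons]
            exact fun h => hk h.symm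
          rw [hc, if_neg hk, add_zero]
      rw [hsplit, PySem.List.sum_map_add_int, ih hsub', sum_map_ite_single f y ks hnd hmem]
      simp [add_comm]

-- on a letter, A's per-character score equals B's score of its lowercased form
theorem valA_eq (c : Char) (_h : ('A' ≤ c ∧ c ≤ 'Z') ∨ ('a' ≤ c ∧ c ≤ 'z')) :
    (if 'A' ≤ c ∧ c ≤ 'Z' then ((c.toNat : Int) - ('A'.toNat : Int) + 1)
     else ((c.toNat : Int) - ('a'.toNat : Int) + 1))
    = ((lowAscii c).toNat : Int) - ('a'.toNat : Int) + 1 := by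
  unfold lowAscii
  by_cases hu : 'A' ≤ c ∧ c ≤ 'Z'
  · have hle : c.toNat ≤ 90 := hu.2
    have hofNat : (Char.ofNat (c.toNat + 32)).toNat = c.toNat + 32 := by
      have hv : (c.toNat + 32).isValidChar := Or.inl (by omega)
      simp [Char.ofNat, hv, Char.ofNatAux]
      omega
    simp only [if_pos hu, hofNat]
    push_cast
    omega
  · simp [hu]

-- A's scoring loop is of the shape 'acc + g c'
theorem scoreStep_eq :
    (fun (score : Int) (c : Char) =>
      if 'A' ≤ c ∧ c ≤ 'Z' then score + ((c.toNat : Int) - ('A'.toNat : Int) + 1)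
      else score + ((c.toNat : Int) - ('a'.toNat : Int) + 1))
    = fun (score : Int) (c : Char) => score +
        (if 'A' ≤ c ∧ c ≤ 'Z' then ((c.toNat : Int) - ('A'.toNat : Int) + 1)
         else ((c.toNat : Int) - ('a'.toNat : Int) + 1)) := by
  funext score c; split <;> rfl

-- ===== VERDICT (by name: the statement is the Claim_ definition above) =====
theorem findTheSum_spec : Claim_equal_findTheSum := by
  intro s _
  unfold Spec_findTheSum findTheSum findTheSum_alt
  simp only [PySem.List.foldl_append_ite_eq_filter, List.nil_append, foldl_filter_insert,
    PySem.Dict.foldl_insert_getD_add_one_eq_counter, PySem.Dict.items_counter, scoreStep_eq]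
  simp only [PySem.List.foldl_add, zero_add, List.map_map, Function.comp_def]
  rw [sum_counts (fun k => ((k.toNat : Int) - ('a'.toNat : Int) + 1))
        (PySem.Set.ofList ((s.toList.filter (fun c => decide (('A' ≤ c ∧ c ≤ 'Z') ∨ ('a' ≤ c ∧ c ≤ 'z')))).map lowAscii))
        (PySem.Set.nodup_ofList _)
        ((s.toList.filter (fun c => decide (('A' ≤ c ∧ c ≤ 'Z') ∨ ('a' ≤ c ∧ c ≤ 'z')))).map lowAscii)
        (fun y hy => (PySem.Set.mem_ofList _ y).mpr hy)]
  rw [List.map_map]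
  apply congrArg List.sum
  apply List.map_congr_left
  intro c hc
  have hp := (List.mem_filter.mp hc).2
  have hprop : ('A' ≤ c ∧ c ≤ 'Z') ∨ ('a' ≤ c ∧ c ≤ 'z') := of_decide_eq_true hp
  exact valA_eq c hprop
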